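-- pv_equiv track=rewrite | github.com/zplab-dev/Holly | code/readcsvfile.py | find_row_lifespans
-- ===== SOURCE A (Python) =====
-- wellies = 'BCDEFGHIJKLMNO'
--
-- def find_row_lifespans(lifespans, wells):
-- 	sorted_lifespans=[]
--
-- 	for letter in 'BCDEFGHIJKLMNO':
-- 		sorted_lifespans.append([])
-- 	for i in range(0, len(wellies)):
-- 		for j, well in enumerate(wells):
-- 			if well[0]==wellies[i]:
-- 				sorted_lifespans[i].append(lifespans[j])
--
--
-- 	return (sorted_lifespans)
-- ===== SOURCE B (Python) =====
-- wellies = 'BCDEFGHIJKLMNO'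
--
-- def find_row_lifespans(lifespans, wells):
--     grouped = {}
--     for well, lifespan in zip(wells, lifespans):
--         grouped.setdefault(well[0], []).append(lifespan)
--     return [grouped.get(letter, []) for letter in wellies]
-- ===== Notes on version B (the rewrite author's own statement) =====
-- stated objective: faster
-- what changed: One grouping pass over zip(wells, lifespans) into a dict keyed by the well's first letter, then one extraction pass over the 14 letters, replacing A's 14 repeated scans of all wells.
import Mathlib
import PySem

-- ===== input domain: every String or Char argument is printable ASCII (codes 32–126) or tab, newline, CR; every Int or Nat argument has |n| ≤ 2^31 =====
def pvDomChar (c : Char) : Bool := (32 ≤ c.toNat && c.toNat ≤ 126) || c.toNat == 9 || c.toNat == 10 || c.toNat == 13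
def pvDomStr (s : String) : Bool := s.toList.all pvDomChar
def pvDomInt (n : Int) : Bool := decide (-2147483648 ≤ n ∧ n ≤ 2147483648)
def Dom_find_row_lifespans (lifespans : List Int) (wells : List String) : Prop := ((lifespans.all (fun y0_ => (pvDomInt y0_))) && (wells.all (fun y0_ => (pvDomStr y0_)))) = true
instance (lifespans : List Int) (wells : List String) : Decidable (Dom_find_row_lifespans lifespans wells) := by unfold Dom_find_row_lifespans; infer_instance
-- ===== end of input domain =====

-- B replaces A's 14 repeated scans of all wells with one grouping pass into a dict plus one
-- extraction pass over the 14 letters (objective: faster by a constant factor).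

-- ===== PORT A =====
def welliesA : String := "BCDEFGHIJKLMNO"

def find_row_lifespans (lifespans : List Int) (wells : List String) : List (List Int) :=
  -- for letter in 'BCDEFGHIJKLMNO': sorted_lifespans.append([])
  let sorted0 : List (List Int) := welliesA.toList.foldl (fun acc _ => acc ++ [([] : List Int)]) []
  -- for i in range(0, len(wellies)): for j, well in enumerate(wells): …
  (PySem.List.pyRange 0 (welliesA.toList.length) 1).foldl
    (fun sorted i =>
      (PySem.List.enumerate wells).foldl
        (fun s jw =>
          if PySem.Str.pyGet? jw.2 0 = PySem.Str.pyGet? welliesA i then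
            -- sorted_lifespans[i].append(lifespans[j]); lifespans[j] raises outside Pre_, .getD 0 is unreachable there
            s.set i.toNat (s.getD i.toNat [] ++ [(PySem.List.pyGet? lifespans jw.1).getD 0])
          else s)
        sorted)
    sorted0

-- ===== PORT B =====
def find_row_lifespans_alt (lifespans : List Int) (wells : List String) : List (List Int) :=
  -- grouped.setdefault(well[0], []).append(lifespan); well[0] raises on an empty well (outside Pre_)
  let grouped : PySem.Dict Char (List Int) :=
    (wells.zip lifespans).foldl
      (fun d p =>
        match PySem.Str.pyGet? p.1 0 with
        | some c => d.insert c (d.getD c [] ++ [p.2])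
        | none => d)
      PySem.Dict.empty
  welliesA.toList.map (fun c => grouped.getD c [])

-- ===== PRECONDITION & SPEC =====
-- Pre_ excludes exactly the inputs on which Python A raises IndexError: some well is the empty
-- string (well[0]), or a well at an index past the end of lifespans starts with one of the 14
-- letters (lifespans[j]).
def Pre_find_row_lifespans (lifespans : List Int) (wells : List String) : Prop :=
  (∀ w ∈ wells, w.toList ≠ []) ∧
  (∀ w ∈ wells.drop lifespans.length,
    (w.toList.head?.all (fun c => !welliesA.toList.contains c)) = true)
instance (lifespans : List Int) (wells : List String) : Decidable (Pre_find_row_lifespans lifespans wells) := by unfold Pre_find_row_lifespans; infer_instance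

def pvWitness_find_row_lifespans : List Int × List String := ([18, 25, 30], ["B1", "C2", "B3"])

def Spec_find_row_lifespans (lifespans : List Int) (wells : List String) (out : List (List Int)) : Prop := out = find_row_lifespans_alt lifespans wells
instance (lifespans : List Int) (wells : List String) (out : List (List Int)) : Decidable (Spec_find_row_lifespans lifespans wells out) := by unfold Spec_find_row_lifespans; infer_instance

-- ===== CLAIM (what is proved, stated in full; the proofs are below) =====
def Claim_equal_find_row_lifespans : Prop := ∀ (lifespans : List Int) (wells : List String), Dom_find_row_lifespans lifespans wells → Pre_find_row_lifespans lifespans wells → Spec_find_row_lifespans lifespans wells (find_row_lifespans lifespans wells)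


-- ===== LEMMAS AND PROOFS =====

-- first character of a Python string, as the ports compute it
theorem pyGet0_eq_head? (s : String) : PySem.Str.pyGet? s 0 = s.toList.head? := by
  simp [PySem.List.pyGet?_zero, List.head?_eq_getElem?]

-- A's bucket for letter c: scan wells with absolute indices, collect lifespans[j] on a match
def bucketA (lifespans : List Int) (c : Char) (es : List (Int × String)) : List Int :=
  es.filterMap (fun jw => if jw.2.toList.head? = some c then some ((PySem.List.pyGet? lifespans jw.1).getD 0) else none)

-- B's bucket for letter c: filter the zipped pairs
def bucketB (c : Char) (ps : List (String × Int)) : List Int :=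
  ps.filterMap (fun p => if p.1.toList.head? = some c then some p.2 else none)

-- A's inner loop only touches slot k
theorem inner_fold_eq (o : Option Char) (g : Int × String → Int) (es : List (Int × String)) :
    ∀ (s : List (List Int)) (k : Nat),
    es.foldl (fun s jw => if jw.2.toList.head? = o then s.set k (s.getD k [] ++ [g jw]) else s) s
      = s.set k (s.getD k [] ++ es.filterMap (fun jw => if jw.2.toList.head? = o then some (g jw) else none)) := by
  induction es with
  | nil =>
    intro s k
    simp only [List.foldl_nil, List.filterMap_nil, List.append_nil]
    by_cases hk : k < s.length
    · rw [List.getD_eq_getElem?_getD, List.getElem?_eq_getElem hk]; simp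
    · rw [List.set_eq_of_length_le (by omega)]
  | cons jw es ih =>
    intro s k
    rw [List.foldl_cons, List.filterMap_cons]
    by_cases h : jw.2.toList.head? = o
    · rw [if_pos h, if_pos h, ih]
      by_cases hk : k < s.length
      · simp [List.getD_eq_getElem?_getD, hk, List.set_set]
      · simp [List.set_eq_of_length_le (by omega : s.length ≤ k)]
    · rw [if_neg h, if_neg h, ih]

-- A's outer loop: processing ascending indices over fresh empty slots appends the buckets in order
theorem outer_fold_eq (b : Nat → List Int) :
    ∀ (n k : Nat) (s : List (List Int)), s.length = k →
    (List.range' k n).foldl (fun st m => st.set m (st.getD m [] ++ b m)) (s ++ List.replicate n ([] : List Int))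
      = s ++ (List.range' k n).map b := by
  intro n
  induction n with
  | zero => intro k s _; simp
  | succ n ih =>
    intro k s hs
    rw [List.range'_succ, List.foldl_cons]
    have hgetD : (s ++ ([] : List Int) :: List.replicate n []).getD k [] = [] := by
      rw [List.getD_eq_getElem?_getD, ← hs, List.getElem?_append_right (by omega)]
      simp
    have hset : (s ++ ([] : List Int) :: List.replicate n []).set k (([] : List Int) ++ b k)
        = (s ++ [b k]) ++ List.replicate n [] := by
      rw [← hs, List.set_append_right _ _ (by omega)]
      simp
    have hrepl : List.replicate (n + 1) ([] : List Int) = [] :: List.replicate n [] := rfl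
    rw [hrepl, hgetD, hset, ih (k + 1) (s ++ [b k]) (by simp [hs])]
    simp [List.map_cons]

-- B's dict fold: getD of any letter is the bucket of the processed pairs
theorem dict_fold_getD (ps : List (String × Int)) :
    ∀ (d : PySem.Dict Char (List Int)) (c : Char),
    ((ps.foldl (fun d p =>
        match PySem.Str.pyGet? p.1 0 with
        | some c0 => d.insert c0 (d.getD c0 [] ++ [p.2])
        | none => d) d).getD c [])
      = d.getD c [] ++ bucketB c ps := by
  induction ps with
  | nil => intro d c; simp [bucketB]
  | cons p ps ih =>
    intro d c
    rw [List.foldl_cons, pyGet0_eq_head?]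
    cases hh : p.1.toList.head? with
    | none =>
      have : bucketB c (p :: ps) = bucketB c ps := by simp [bucketB, hh]
      simp only [this]
      exact ih d c
    | some c0 =>
      rw [ih]
      by_cases hc : c = c0
      · subst hc
        simp [bucketB, hh, PySem.Dict.getD_insert]
      · simp [bucketB, hh, PySem.Dict.getD_insert, hc, Ne.symm hc]

-- per letter, A's bucket equals B's bucket, given that no well past lifespans matches the letter
theorem bucket_eq (lifespans : List Int) (c : Char) :
    ∀ (ws : List String) (j : Nat),
    (∀ (m : Nat) (hm : m < ws.length), lifespans.length ≤ j + m → (ws[m]).toList.head? ≠ some c) →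
    bucketA lifespans c (PySem.List.enumerate ws j)
      = bucketB c (ws.zip (lifespans.drop j)) := by
  intro ws
  induction ws with
  | nil => intro j _; simp [bucketA, bucketB, PySem.List.enumerate_nil]
  | cons w ws ih =>
    intro j hyp
    rw [PySem.List.enumerate_cons]
    have hcast : ((j : Int) + 1) = (((j + 1 : Nat)) : Int) := by push_cast; ring
    have ih' := ih (j + 1) (fun m hm hle => hyp (m + 1) (by simpa using hm) (by omega))
    simp only [bucketA, bucketB] at ih' ⊢
    by_cases h : w.toList.head? = some c
    · have hj : j < lifespans.length := by
        by_contra hle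
        exact hyp 0 (by simp) (by omega) (by simpa using h)
      have hget : PySem.List.pyGet? lifespans (j : Int) = some lifespans[j] := by
        rw [PySem.List.pyGet?_natCast]; exact List.getElem?_eq_getElem hj
      rw [List.drop_eq_getElem_cons hj, List.zip_cons_cons,
        List.filterMap_cons_some (by simp [h, hget] : _ = some lifespans[j]),
        List.filterMap_cons_some (by simp [h] : _ = some lifespans[j]),
        hcast, ih']
    · rw [List.filterMap_cons_none (by simp [h]), hcast, ih']
      cases hdrop : List.drop j lifespans with
      | nil =>
        have hlen : lifespans.length ≤ j := by
          have := congrArg List.length hdrop; simp at this; omega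
        rw [List.drop_eq_nil_of_le (by omega : lifespans.length ≤ j + 1)]
        simp
      | cons a as =>
        have hj : j < lifespans.length := by
          have := congrArg List.length hdrop; simp at this; omega
        have h3 := List.drop_eq_getElem_cons (l := lifespans) hj
        rw [hdrop] at h3
        injection h3 with h4 h5
        subst h4; subst h5
        rw [List.zip_cons_cons, List.filterMap_cons_none (by simp [h])]

-- ===== VERDICT (by name: the statement is the Claim_ definition above) =====
theorem find_row_lifespans_spec : Claim_equal_find_row_lifespans := by
  intro lifespans wells _ hpre
  unfold Spec_find_row_lifespans
  have hA : find_row_lifespans lifespans wells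
      = (List.range' 0 14).map (fun (m : Nat) =>
          (PySem.List.enumerate wells).filterMap (fun jw =>
            if jw.2.toList.head? = PySem.Str.pyGet? welliesA ((m : Nat) : Int) then
              some ((PySem.List.pyGet? lifespans jw.1).getD 0) else none)) := by
    unfold find_row_lifespans
    rw [show welliesA.toList.foldl (fun acc _ => acc ++ [([] : List Int)]) [] = List.replicate 14 ([] : List Int) from by decide]
    rw [show ((welliesA.toList.length : Int)) = (((14 : Nat)) : Int) from rfl]
    rw [PySem.List.pyRange_one, show ((((14 : Nat)) : Int) - 0).toNat = 14 from rfl, List.foldl_map]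
    simp only [pyGet0_eq_head?, zero_add, Int.toNat_natCast]
    simp only [inner_fold_eq]
    rw [List.range_eq_range', show (List.replicate 14 ([] : List Int)) = [] ++ List.replicate 14 [] from rfl,
      outer_fold_eq _ 14 0 [] rfl, List.nil_append]
  have hB : find_row_lifespans_alt lifespans wells
      = welliesA.toList.map (fun c => bucketB c (wells.zip lifespans)) := by
    unfold find_row_lifespans_alt
    refine List.map_congr_left ?_
    intro c _
    rw [dict_fold_getD]
    simp [PySem.Dict.getD, PySem.Dict.get?, PySem.Dict.empty]
  rw [hA, hB]
  apply List.ext_getElem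
  · simp [welliesA]
  intro m h1 h2
  have hm : m < 14 := by simpa using h1
  have hm' : m < welliesA.toList.length := by
    simpa [welliesA] using hm
  simp only [List.getElem_map, List.getElem_range', Nat.zero_add, one_mul]
  have hw : PySem.Str.pyGet? welliesA (m : Int) = some (welliesA.toList[m]'hm') := by
    rw [PySem.Str.pyGet?_natCast]
    exact List.getElem?_eq_getElem hm'
  rw [hw]
  have hyp : ∀ (m' : Nat) (hm2 : m' < wells.length), lifespans.length ≤ 0 + m' →
      (wells[m']).toList.head? ≠ some (welliesA.toList[m]'hm') := by
    intro m' hm2 hle hc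
    have hmem : wells[m'] ∈ wells.drop lifespans.length := by
      have : (wells.drop lifespans.length)[m' - lifespans.length]'(by
          rw [List.length_drop]; omega) = wells[m'] := by
        rw [List.getElem_drop]
        congr 1; omega
      rw [← this]
      exact List.getElem_mem _
    have hall := hpre.2 _ hmem
    rw [hc] at hall
    simp only [Option.all_some, Bool.not_eq_true'] at hall
    rw [show welliesA.toList.contains (welliesA.toList[m]'hm') = true from by
      simpa using List.getElem_mem hm'] at hall
    exact Bool.noConfusion hall
  have hb := bucket_eq lifespans (welliesA.toList[m]'hm') wells 0 hyp
  simp only [bucketA, bucketB, List.drop_zero, Nat.cast_zero] at hb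
  exact hb
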